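-- pv_equiv track=rewrite | github.com/drivollier/Ludomatik | streams.py | suitsanjok
-- ===== SOURCE A (Python) =====
-- def suitsanjok(L):
--     if len(L)==1:
--         return([1])
--     else:
--         A=L[1:]
--         S=suitsanjok(A)
--         if L[0]<=A[0]:
--             S[0]+=1
--         else:
--             S.insert(0,1)
--         return(S)
-- ===== SOURCE B (Python) =====
-- def suitsanjok(L):
--     if not L:
--         return []
--     runs = []
--     cnt = 1
--     for prev, cur in zip(L, L[1:]):
--         if prev <= cur:
--             cnt += 1
--         else:
--             runs.append(cnt)
--             cnt = 1
--     runs.append(cnt)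
--     return runs
-- ===== Notes on version B (the rewrite author's own statement) =====
-- stated objective: faster
-- what changed: Replaced A's deep recursion on the tail (which rebuilds/shifts the result list and hits Python's recursion limit) by a single left-to-right pass over adjacent pairs counting run lengths.
import Mathlib
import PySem

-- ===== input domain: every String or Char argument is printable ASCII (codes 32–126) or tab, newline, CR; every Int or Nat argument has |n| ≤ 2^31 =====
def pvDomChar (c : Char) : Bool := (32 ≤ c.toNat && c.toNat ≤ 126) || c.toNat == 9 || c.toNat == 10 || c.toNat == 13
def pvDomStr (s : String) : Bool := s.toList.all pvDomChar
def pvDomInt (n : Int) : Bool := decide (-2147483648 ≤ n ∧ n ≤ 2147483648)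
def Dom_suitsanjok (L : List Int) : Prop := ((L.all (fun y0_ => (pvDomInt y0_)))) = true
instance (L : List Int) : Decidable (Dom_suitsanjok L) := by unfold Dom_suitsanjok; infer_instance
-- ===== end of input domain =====

-- B replaces A's tail recursion (with S.insert(0,1) shifting) by one linear pass counting run lengths;
-- equivalence is about the return value only.

-- ===== PORT A =====
-- A: if len(L)==1 -> [1]; else recurse on the tail, then either bump S[0] or insert a 1 in front.
-- On [] Python recurses forever (RecursionError); that input is excluded by Pre_ (the [] branch here is unreachable filler).
def suitsanjok (L : List Int) : List Int :=
  match L with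
  | [] => []
  | [_] => [1]
  | x :: y :: t =>
    let S := suitsanjok (y :: t)
    if x ≤ y then
      match S with
      | s :: r => (s + 1) :: r
      | [] => []
    else
      1 :: S

-- ===== PORT B =====
-- Source B: guard for empty, then fold over zip(L, L[1:]) with state (runs, cnt), finally append cnt.
def suitsanjok_alt (L : List Int) : List Int :=
  match L with
  | [] => []
  | _ =>
    let step : (List Int × Int) → (Int × Int) → (List Int × Int) :=
      fun st p => if p.1 ≤ p.2 then (st.1, st.2 + 1) else (st.1 ++ [st.2], 1)
    let fin := (L.zip (L.drop 1)).foldl step ([], 1)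
    fin.1 ++ [fin.2]

-- ===== PRECONDITION & SPEC =====
-- Pre_ excludes only the empty list, on which Python A recurses forever (RecursionError).
def Pre_suitsanjok (L : List Int) : Prop := L ≠ []
instance (L : List Int) : Decidable (Pre_suitsanjok L) := by unfold Pre_suitsanjok; infer_instance
def pvWitness_suitsanjok : List Int := [3, 1, 2]

def Spec_suitsanjok (L : List Int) (out : List Int) : Prop := out = suitsanjok_alt L
instance (L : List Int) (out : List Int) : Decidable (Spec_suitsanjok L out) := by unfold Spec_suitsanjok; infer_instance

-- ===== CLAIM (what is proved, stated in full; the proofs are below) =====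
def Claim_equal_suitsanjok : Prop := ∀ (L : List Int), Dom_suitsanjok L → Pre_suitsanjok L → Spec_suitsanjok L (suitsanjok L)

-- ===== LEMMAS AND PROOFS =====

-- add d to the head of a run-length list
def pvBump (S : List Int) (d : Int) : List Int :=
  match S with
  | [] => []
  | s :: r => (s + d) :: r

def pvStep : (List Int × Int) → (Int × Int) → (List Int × Int) :=
  fun st p => if p.1 ≤ p.2 then (st.1, st.2 + 1) else (st.1 ++ [st.2], 1)

theorem suitsanjok_ne_nil (x : Int) (xs : List Int) : suitsanjok (x :: xs) ≠ [] := by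
  match xs with
  | [] => simp [suitsanjok]
  | y :: t =>
    rw [suitsanjok]
    have h := suitsanjok_ne_nil y t
    cases hS : suitsanjok (y :: t) with
    | nil => exact absurd hS h
    | cons s r => by_cases hxy : x ≤ y <;> simp [hxy]

-- foldl over the adjacent pairs of x::xs, started at (runs, cnt), equals
-- runs prepended to A's answer with its first run length bumped by cnt - 1.
theorem pvLoop (x : Int) (xs : List Int) (runs : List Int) (cnt : Int) :
    (let fin := ((x :: xs).zip xs).foldl pvStep (runs, cnt); fin.1 ++ [fin.2])
      = runs ++ pvBump (suitsanjok (x :: xs)) (cnt - 1) := by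
  induction xs generalizing x runs cnt with
  | nil => simp [suitsanjok, pvBump]
  | cons y t ih =>
    simp only [List.zip_cons_cons, List.foldl_cons]
    by_cases hxy : x ≤ y
    · have h1 := ih y runs (cnt + 1)
      simp only [pvStep, hxy, if_pos] at h1 ⊢
      rw [h1]
      rw [suitsanjok]
      cases hS : suitsanjok (y :: t) with
      | nil => exact absurd hS (suitsanjok_ne_nil y t)
      | cons s r => simp [hxy, pvBump]; try ring
    · have h1 := ih y (runs ++ [cnt]) 1
      simp only [pvStep, hxy, if_neg, not_false_iff] at h1 ⊢
      rw [h1]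
      rw [suitsanjok]
      cases hS : suitsanjok (y :: t) with
      | nil => exact absurd hS (suitsanjok_ne_nil y t)
      | cons s r => simp [hxy, pvBump]

-- ===== VERDICT (by name: the statement is the Claim_ definition above) =====
theorem suitsanjok_spec : Claim_equal_suitsanjok := by
  intro L _ hpre
  unfold Spec_suitsanjok
  match L with
  | [] => exact absurd rfl hpre
  | x :: xs =>
    have halt : suitsanjok_alt (x :: xs)
        = (let fin := ((x :: xs).zip xs).foldl pvStep ([], 1); fin.1 ++ [fin.2]) := rfl
    rw [halt, pvLoop x xs [] 1]
    simp only [List.nil_append]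
    cases hS : suitsanjok (x :: xs) with
    | nil => exact absurd hS (suitsanjok_ne_nil x xs)
    | cons s r => simp [pvBump]
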